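-- pv_equiv track=rewrite | github.com/aliza-456/cand_5a31797a | Q3.py | softmax_classify
-- ===== SOURCE A (Python) =====
-- def softmax_classify(W, b, X):
--     predictions = []
--
--     for x in X:
--         logits = []
--         for i in range(len(W)):
--             logit = sum(w * xi for w, xi in zip(W[i], x)) + b[i]
--             logits.append(logit)
--
--         max_val = max(logits)
--         candidates = [i for i, v in enumerate(logits) if v == max_val]
--
--         predictions.append(min(candidates))
--
--     return predictions
-- ===== SOURCE B (Python) =====
-- def _best(pairs, x, lo, hi):
--     # best (logit, class index) among classes lo..hi-1 by divide and conquer;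
--     # '>=' keeps the left half on ties, so the lowest index wins overall
--     if hi <= lo + 1:
--         w, bi = pairs[lo]
--         return (sum(wj * xj for wj, xj in zip(w, x)) + bi, lo)
--     mid = (lo + hi) // 2
--     left = _best(pairs, x, lo, mid)
--     right = _best(pairs, x, mid, hi)
--     return left if left[0] >= right[0] else right
--
-- def softmax_classify(W, b, X):
--     pairs = list(zip(W, b))
--     return [_best(pairs, x, 0, len(pairs))[1] for x in X]
-- ===== Notes on version B (the rewrite author's own statement) =====
-- stated objective: alternative
-- what changed: B replaces A's staged per-vector passes (build a logits list, max, build a candidates list, min) by a divide-and-conquer tournament over the class range: recursively take the best (logit, index) of each half and combine with a left-biased '>=', which yields the lowest-index argmax with no intermediate lists.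
import Mathlib
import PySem

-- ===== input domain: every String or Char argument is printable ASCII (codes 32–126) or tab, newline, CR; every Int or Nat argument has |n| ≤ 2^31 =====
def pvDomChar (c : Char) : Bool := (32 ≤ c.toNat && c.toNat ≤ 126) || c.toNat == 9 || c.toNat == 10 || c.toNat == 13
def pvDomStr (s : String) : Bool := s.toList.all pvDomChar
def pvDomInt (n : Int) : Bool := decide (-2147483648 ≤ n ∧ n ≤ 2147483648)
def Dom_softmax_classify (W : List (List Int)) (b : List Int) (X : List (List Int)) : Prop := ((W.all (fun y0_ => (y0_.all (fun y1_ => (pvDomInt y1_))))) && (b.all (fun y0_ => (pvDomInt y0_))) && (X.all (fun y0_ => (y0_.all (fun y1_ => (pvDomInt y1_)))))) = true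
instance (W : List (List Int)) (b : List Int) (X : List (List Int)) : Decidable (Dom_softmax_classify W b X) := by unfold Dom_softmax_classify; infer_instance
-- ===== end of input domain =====

-- B replaces A's per-vector build-logits / max / candidates / min passes by a divide-and-conquer
-- tournament over the class range (left-biased '>=' keeps the lowest argmax index); return values only.

-- ===== PORT A =====
def softmax_classify (W : List (List Int)) (b : List Int) (X : List (List Int)) : List Int :=
  X.foldl (fun predictions x =>
    let logits := (PySem.List.pyRange 0 (W.length : Int) 1).foldl
      (fun ls i =>
        ls ++ [ ((PySem.List.pyGetD W i []).zip x).foldl (fun s q => s + q.1 * q.2) 0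
                + PySem.List.pyGetD b i 0 ]) []
    let maxVal := (PySem.List.max? logits (fun y => y)).getD 0
    let candidates := ((PySem.List.enumerate logits 0).filter (fun p => p.2 == maxVal)).map (fun p => p.1)
    predictions ++ [ (PySem.List.min? candidates (fun y => y)).getD 0 ]) []

-- ===== PORT B =====
-- the logit of class lo: sum(wj * xj for wj, xj in zip(w, x)) + bi with (w, bi) = pairs[lo]
def pvF (pairs : List (List Int × Int)) (x : List Int) (lo : Nat) : Int :=
  ((PySem.List.pyGetD pairs (lo : Int) ([], 0)).1.zip x).foldl (fun s q => s + q.1 * q.2) 0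
    + (PySem.List.pyGetD pairs (lo : Int) ([], 0)).2

-- _best: divide-and-conquer tournament over classes lo..hi-1
-- (the extra 'fuel' argument, consumed once per halving, only makes the recursion structural;
--  it is called with fuel = hi - lo ≤ length, enough for every reachable call)
def pvBest (pairs : List (List Int × Int)) (x : List Int) : Nat → Nat → Nat → Int × Nat
  | 0, lo, _ => (pvF pairs x lo, lo)
  | fuel + 1, lo, hi =>
    if hi ≤ lo + 1 then
      (pvF pairs x lo, lo)
    else
      if (pvBest pairs x fuel lo ((lo + hi) / 2)).1 ≥ (pvBest pairs x fuel ((lo + hi) / 2) hi).1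
      then pvBest pairs x fuel lo ((lo + hi) / 2)
      else pvBest pairs x fuel ((lo + hi) / 2) hi

def softmax_classify_alt (W : List (List Int)) (b : List Int) (X : List (List Int)) : List Int :=
  X.map (fun x => ((pvBest (W.zip b) x (W.zip b).length 0 (W.zip b).length).2 : Int))

-- ===== PRECONDITION & SPEC =====
-- Pre_ excludes exactly the inputs where A raises: a nonempty X with an empty W (ValueError
-- from max([])) or with b shorter than W (IndexError on b[i]).
def Pre_softmax_classify (W : List (List Int)) (b : List Int) (X : List (List Int)) : Prop :=
  X = [] ∨ (W ≠ [] ∧ W.length ≤ b.length)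
instance (W : List (List Int)) (b : List Int) (X : List (List Int)) : Decidable (Pre_softmax_classify W b X) := by unfold Pre_softmax_classify; infer_instance
def pvWitness_softmax_classify : List (List Int) × List Int × List (List Int) :=
  ([[1, 0], [2, -1]], [0, 3], [[4, 5], [0, 0]])

def Spec_softmax_classify (W : List (List Int)) (b : List Int) (X : List (List Int)) (out : List Int) : Prop := out = softmax_classify_alt W b X
instance (W : List (List Int)) (b : List Int) (X : List (List Int)) (out : List Int) : Decidable (Spec_softmax_classify W b X out) := by unfold Spec_softmax_classify; infer_instance

-- ===== CLAIM (what is proved, stated in full; the proofs are below) =====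
def Claim_equal_softmax_classify : Prop := ∀ (W : List (List Int)) (b : List Int) (X : List (List Int)), Dom_softmax_classify W b X → Pre_softmax_classify W b X → Spec_softmax_classify W b X (softmax_classify W b X)

-- ===== LEMMAS AND PROOFS =====

-- first index at which m occurs, counting from j
def pvFi (m : Int) : List Int → Int → Option Int
  | [], _ => none
  | h :: t, j => if h = m then some j else pvFi m t (j + 1)

lemma pv_le_foldl_max : ∀ (t : List Int) (v : Int), v ≤ t.foldl max v := by
  intro t
  induction t with
  | nil => intro v; simp
  | cons h t ih => intro v; exact le_trans (le_max_left v h) (ih (max v h))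

lemma pv_mem_le_foldl_max : ∀ (t : List Int) (v y : Int), y ∈ t → y ≤ t.foldl max v := by
  intro t
  induction t with
  | nil => intro v y hy; simp at hy
  | cons h t ih =>
    intro v y hy
    rcases List.mem_cons.mp hy with rfl | hy
    · exact le_trans (le_max_right v y) (pv_le_foldl_max t _)
    · exact ih (max v h) y hy

lemma pv_foldl_max_le : ∀ (t : List Int) (v M : Int), v ≤ M → (∀ y ∈ t, y ≤ M) → t.foldl max v ≤ M := by
  intro t
  induction t with
  | nil => intro v M h _; simpa using h
  | cons h t ih =>
    intro v M hv ht
    rw [List.foldl_cons]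
    exact ih (max v h) M (max_le hv (ht h (by simp))) (fun y hy => ht y (by simp [hy]))

lemma pv_foldl_min_of_le : ∀ (l : List Int) (x : Int), (∀ y ∈ l, x ≤ y) → l.foldl min x = x := by
  intro l
  induction l with
  | nil => intro x _; simp
  | cons h t ih =>
    intro x hx
    have h1 : min x h = x := min_eq_left (hx h (by simp))
    simp only [List.foldl_cons, h1]
    exact ih x (fun y hy => hx y (by simp [hy]))

-- A's candidates list, structurally
lemma pv_cand_cons (m h : Int) (t : List Int) (k : Int) :
    ((PySem.List.enumerate (h :: t) k).filter (fun p => p.2 == m)).map (fun p => p.1)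
    = if h = m then k :: ((PySem.List.enumerate t (k + 1)).filter (fun p => p.2 == m)).map (fun p => p.1)
      else ((PySem.List.enumerate t (k + 1)).filter (fun p => p.2 == m)).map (fun p => p.1) := by
  rw [PySem.List.enumerate_cons]
  by_cases hh : h = m <;> simp [hh]

lemma pv_cand_ge (m : Int) : ∀ (ls : List Int) (k j : Int),
    j ∈ ((PySem.List.enumerate ls k).filter (fun p => p.2 == m)).map (fun p => p.1) → k ≤ j := by
  intro ls
  induction ls with
  | nil => intro k j hj; simp [PySem.List.enumerate_nil] at hj
  | cons h t ih =>
    intro k j hj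
    rw [pv_cand_cons] at hj
    by_cases hh : h = m
    · rw [if_pos hh] at hj
      rcases List.mem_cons.mp hj with rfl | hj
      · omega
      · have := ih (k + 1) j hj; omega
    · rw [if_neg hh] at hj
      have := ih (k + 1) j hj; omega

-- min of A's candidates = first index where m occurs
lemma pv_min_cand (m : Int) : ∀ (ls : List Int) (k : Int), m ∈ ls →
    (PySem.List.min? (((PySem.List.enumerate ls k).filter (fun p => p.2 == m)).map (fun p => p.1)) (fun y => y)).getD 0
    = (pvFi m ls k).getD 0 := by
  intro ls
  induction ls with
  | nil => intro k hm; simp at hm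
  | cons h t ih =>
    intro k hm
    rw [pv_cand_cons]
    by_cases hh : h = m
    · rw [if_pos hh]
      rw [PySem.List.min?_id_cons]
      have hge : ∀ y ∈ ((PySem.List.enumerate t (k + 1)).filter (fun p => p.2 == m)).map (fun p => p.1), k ≤ y := by
        intro y hy
        have := pv_cand_ge m t (k + 1) y hy; omega
      rw [pv_foldl_min_of_le _ k hge]
      simp [pvFi, hh]
    · rw [if_neg hh]
      have hmt : m ∈ t := by
        rcases List.mem_cons.mp hm with rfl | hmt
        · exact absurd rfl hh
        · exact hmt
      rw [ih (k + 1) hmt]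
      simp [pvFi, hh]

-- pvFi finds exactly the first index attaining m
lemma pvFi_eq (m : Int) : ∀ (ls : List Int) (j : Nat) (k : Int), j < ls.length →
    ls.getD j 0 = m → (∀ i : Nat, i < j → ls.getD i 0 ≠ m) → pvFi m ls k = some (k + (j : Int)) := by
  intro ls
  induction ls with
  | nil => intro j k hj; simp at hj
  | cons h t ih =>
    intro j k hj hm hne
    cases j with
    | zero =>
      simp only [List.getD_cons_zero] at hm
      simp [pvFi, hm]
    | succ j' =>
      have hne0 : h ≠ m := by
        have := hne 0 (by omega)
        simpa using this
      simp only [List.getD_cons_succ] at hm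
      have hj' : j' < t.length := by simpa using hj
      have hne' : ∀ i : Nat, i < j' → t.getD i 0 ≠ m := by
        intro i hi
        have := hne (i + 1) (by omega)
        simpa using this
      simp only [pvFi, if_neg hne0]
      rw [ih j' (k + 1) hj' hm hne']
      congr 1
      push_cast
      ring

-- accumulate-append loop is a map
lemma pv_foldl_append {α β : Type} (g : α → β) : ∀ (l : List α) (acc : List β),
    l.foldl (fun a x => a ++ [g x]) acc = acc ++ l.map g := by
  intro l
  induction l with
  | nil => intro acc; simp
  | cons h t ih => intro acc; simp [List.foldl_cons, ih]

-- A's logits loop produces the map of the dot products over zip(W, b)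
lemma pv_logits_eq (W : List (List Int)) (b : List Int) (x : List Int) (hlen : W.length ≤ b.length) :
    (PySem.List.pyRange 0 (W.length : Int) 1).map
      (fun i => ((PySem.List.pyGetD W i []).zip x).foldl (fun s q => s + q.1 * q.2) 0
                + PySem.List.pyGetD b i 0)
    = (W.zip b).map (fun wb => (wb.1.zip x).foldl (fun s q => s + q.1 * q.2) 0 + wb.2) := by
  apply List.ext_getElem
  · simp [PySem.List.length_pyRange_one]
    omega
  · intro k hk1 hk2
    simp only [List.getElem_map, PySem.List.getElem_pyRange_one]
    have hkW : k < W.length := by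
      have := hk2; simp at this; omega
    have hkb : k < b.length := by omega
    simp [PySem.List.pyGetD_natCast, List.getElem_zip, List.getD_eq_getElem?_getD,
      hkW, hkb]

-- the tournament returns (value, index) of the FIRST maximal logit in [lo, hi)
lemma pvBest_spec (pairs : List (List Int × Int)) (x : List Int) :
    ∀ (fuel lo hi : Nat), hi - lo ≤ fuel + 1 → lo < hi →
      lo ≤ (pvBest pairs x fuel lo hi).2 ∧ (pvBest pairs x fuel lo hi).2 < hi ∧
      pvF pairs x (pvBest pairs x fuel lo hi).2 = (pvBest pairs x fuel lo hi).1 ∧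
      (∀ i : Nat, lo ≤ i → i < hi → pvF pairs x i ≤ (pvBest pairs x fuel lo hi).1) ∧
      (∀ i : Nat, lo ≤ i → i < (pvBest pairs x fuel lo hi).2 → pvF pairs x i < (pvBest pairs x fuel lo hi).1) := by
  intro fuel
  induction fuel with
  | zero =>
    intro lo hi h1 h2
    simp only [pvBest]
    refine ⟨le_refl _, by omega, trivial, ?_, ?_⟩
    · intro i h3 h4
      have : i = lo := by omega
      subst this; exact le_refl _
    · intro i h3 h4
      omega
  | succ fuel ih =>
    intro lo hi h1 h2
    simp only [pvBest]
    by_cases hb : hi ≤ lo + 1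
    · simp only [if_pos hb]
      refine ⟨le_refl _, by omega, trivial, ?_, ?_⟩
      · intro i h3 h4
        have : i = lo := by omega
        subst this; exact le_refl _
      · intro i h3 h4
        omega
    · simp only [if_neg hb]
      set mid := (lo + hi) / 2 with hmid
      have hlm : lo < mid := by omega
      have hmh : mid < hi := by omega
      obtain ⟨L1, L2, L3, L4, L5⟩ := ih lo mid (by omega) hlm
      obtain ⟨R1, R2, R3, R4, R5⟩ := ih mid hi (by omega) hmh
      by_cases hc : (pvBest pairs x fuel lo mid).1 ≥ (pvBest pairs x fuel mid hi).1
      · simp only [if_pos hc]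
        refine ⟨L1, by omega, L3, ?_, ?_⟩
        · intro i h3 h4
          by_cases him : i < mid
          · exact L4 i h3 him
          · exact le_trans (R4 i (by omega) h4) hc
        · intro i h3 h4
          exact L5 i h3 h4
      · simp only [if_neg hc]
        push Not at hc
        refine ⟨by omega, R2, R3, ?_, ?_⟩
        · intro i h3 h4
          by_cases him : i < mid
          · exact le_of_lt (lt_of_le_of_lt (L4 i h3 him) hc)
          · exact R4 i (by omega) h4
        · intro i h3 h4
          by_cases him : i < mid
          · exact lt_of_le_of_lt (L4 i h3 him) hc
          · exact R5 i (by omega) h4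

-- the per-vector core: A's build / max / candidates / min equals the tournament's index
lemma pv_core (pairs : List (List Int × Int)) (x : List Int) (hn : 0 < pairs.length) :
    (PySem.List.min? (((PySem.List.enumerate (pairs.map (fun wb => (wb.1.zip x).foldl (fun s q => s + q.1 * q.2) 0 + wb.2)) 0).filter
        (fun p => p.2 == (PySem.List.max? (pairs.map (fun wb => (wb.1.zip x).foldl (fun s q => s + q.1 * q.2) 0 + wb.2)) (fun y => y)).getD 0)).map
        (fun p => p.1)) (fun y => y)).getD 0
    = ((pvBest pairs x pairs.length 0 pairs.length).2 : Int) := by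
  set F : List Int × Int → Int := fun wb => (wb.1.zip x).foldl (fun s q => s + q.1 * q.2) 0 + wb.2 with hF
  set ls := pairs.map F with hls
  have hlen : ls.length = pairs.length := by simp [hls]
  have hbridge : ∀ i : Nat, i < pairs.length → ls.getD i 0 = pvF pairs x i := by
    intro i hi
    simp [hls, pvF, List.getD_eq_getElem?_getD, hi,
      PySem.List.pyGetD_natCast, hF]
  obtain ⟨S1, S2, S3, S4, S5⟩ := pvBest_spec pairs x pairs.length 0 pairs.length (by omega) hn
  set r := pvBest pairs x pairs.length 0 pairs.length with hr
  obtain ⟨v, t, hvt⟩ : ∃ v t, ls = v :: t := by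
    cases hc : ls with
    | nil => rw [hc] at hlen; simp at hlen; omega
    | cons a l => exact ⟨a, l, rfl⟩
  have hgd : ∀ (i : Nat) (h : i < ls.length), ls.getD i 0 = ls[i] := by
    intro i h
    rw [List.getD_eq_getElem?_getD, List.getElem?_eq_getElem h]; rfl
  have hmem : r.1 ∈ ls := by
    have h2 : r.2 < ls.length := by omega
    have he : ls.getD r.2 0 = ls[r.2] := hgd r.2 h2
    rw [hbridge r.2 S2, S3] at he
    rw [he]
    exact List.getElem_mem h2
  have hmax : (PySem.List.max? ls (fun y => y)).getD 0 = r.1 := by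
    rw [hvt, PySem.List.max?_id_cons]
    simp only [Option.getD_some]
    apply le_antisymm
    · apply pv_foldl_max_le
      · have h0 : ls.getD 0 0 = v := by rw [hvt]; simp
        have hb0 := hbridge 0 hn
        rw [h0] at hb0
        rw [hb0]
        exact S4 0 (by omega) hn
      · intro y hy
        have hyls : y ∈ ls := by rw [hvt]; exact List.mem_cons_of_mem _ hy
        obtain ⟨i, hi, hiy⟩ := List.getElem_of_mem hyls
        have hgy : ls.getD i 0 = y := by rw [hgd i hi]; exact hiy
        rw [← hgy, hbridge i (by omega)]
        exact S4 i (by omega) (by omega)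
    · have hmv : r.1 ∈ v :: t := by rw [← hvt]; exact hmem
      rcases List.mem_cons.mp hmv with he | hm
      · rw [he]; exact pv_le_foldl_max t v
      · exact pv_mem_le_foldl_max t v r.1 hm
  rw [hmax]
  rw [pv_min_cand r.1 ls 0 hmem]
  rw [pvFi_eq r.1 ls r.2 0 (by omega) (by rw [hbridge r.2 S2]; exact S3)
    (fun i hi => by
      rw [hbridge i (by omega)]
      exact ne_of_lt (S5 i (by omega) hi))]
  simp

-- ===== VERDICT (by name: the statement is the Claim_ definition above) =====
theorem softmax_classify_spec : Claim_equal_softmax_classify := by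
  intro W b X _ hpre
  unfold Spec_softmax_classify softmax_classify softmax_classify_alt
  rcases hpre with rfl | ⟨hW, hlen⟩
  · simp
  · rw [pv_foldl_append]
    simp only [List.nil_append]
    apply List.map_congr_left
    intro x _
    rw [pv_foldl_append]
    simp only [List.nil_append]
    rw [pv_logits_eq W b x hlen]
    have hn : 0 < (W.zip b).length := by
      have hW0 : 0 < W.length := List.length_pos_iff.mpr hW
      rw [List.length_zip]
      omega
    exact pv_core (W.zip b) x hn
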